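-- pv_equiv track=rewrite | github.com/CharlesBerthet/Math-Python | TP3/tp3.py | fZero
-- ===== SOURCE A (Python) =====
-- def fZero(plnd,pLst):
--     if plnd>=len(pLst):
--         valRen = -1
--     elif pLst[plnd] == 0:
--         valRen = plnd
--     else:
--         valRen = fZero(plnd+1,pLst)
--     return valRen
-- ===== SOURCE B (Python) =====
-- def fZero(plnd, pLst):
--     for i in range(plnd, len(pLst)):
--         if pLst[i] == 0:
--             return i
--     return -1
-- ===== Notes on version B (the rewrite author's own statement) =====
-- stated objective: idiomatic
-- what changed: Replaced the tail recursion (one Python stack frame per scanned element) with a flat iterative for-loop over range(plnd, len(pLst)) returning at the first zero.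
import Mathlib
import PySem

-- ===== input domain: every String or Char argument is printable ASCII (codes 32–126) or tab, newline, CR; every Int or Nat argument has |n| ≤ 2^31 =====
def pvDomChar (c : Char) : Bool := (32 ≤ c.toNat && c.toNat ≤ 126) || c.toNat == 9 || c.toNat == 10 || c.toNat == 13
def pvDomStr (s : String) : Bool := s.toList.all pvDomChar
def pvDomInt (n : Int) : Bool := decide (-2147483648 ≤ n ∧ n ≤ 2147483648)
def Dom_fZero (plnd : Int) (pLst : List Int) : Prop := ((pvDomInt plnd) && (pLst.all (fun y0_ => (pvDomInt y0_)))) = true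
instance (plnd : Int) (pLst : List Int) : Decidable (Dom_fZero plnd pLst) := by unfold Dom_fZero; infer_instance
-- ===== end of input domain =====

-- B replaces A's tail recursion by a flat iterative scan over range(plnd, len(pLst)); return values agree everywhere both return.

-- ===== PORT A =====
-- A's tail recursion; pyGet? none = IndexError (excluded by Pre_), 0 is a dummy there.
def fZero (plnd : Int) (pLst : List Int) : Int :=
  if (pLst.length : Int) ≤ plnd then -1
  else
    match PySem.List.pyGet? pLst plnd with
    | none => 0
    | some v => if v = 0 then plnd else fZero (plnd + 1) pLst
termination_by ((pLst.length : Int) - plnd).toNat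
decreasing_by omega

-- ===== PORT B =====
-- the for-loop over range(plnd, len(pLst)) with early return; dummy 1 on IndexError (excluded by Pre_)
def fZeroLoop (pLst : List Int) : List Int → Int
  | [] => -1
  | i :: rest => if (PySem.List.pyGet? pLst i).getD 1 = 0 then i else fZeroLoop pLst rest

def fZero_alt (plnd : Int) (pLst : List Int) : Int :=
  fZeroLoop pLst (PySem.List.pyRange plnd (pLst.length : Int) 1)

-- ===== PRECONDITION & SPEC =====
-- Pre_ excludes exactly the inputs where the Python A (and B) raises IndexError: plnd < -len(pLst).
def Pre_fZero (plnd : Int) (pLst : List Int) : Prop := -(pLst.length : Int) ≤ plnd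
instance (plnd : Int) (pLst : List Int) : Decidable (Pre_fZero plnd pLst) := by unfold Pre_fZero; infer_instance
def pvWitness_fZero : Int × List Int := (0, [3, 0, 5])

def Spec_fZero (plnd : Int) (pLst : List Int) (out : Int) : Prop := out = fZero_alt plnd pLst
instance (plnd : Int) (pLst : List Int) (out : Int) : Decidable (Spec_fZero plnd pLst out) := by unfold Spec_fZero; infer_instance

-- ===== CLAIM (what is proved, stated in full; the proofs are below) =====
def Claim_equal_fZero : Prop := ∀ (plnd : Int) (pLst : List Int), Dom_fZero plnd pLst → Pre_fZero plnd pLst → Spec_fZero plnd pLst (fZero plnd pLst)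

-- ===== LEMMAS AND PROOFS =====
theorem fZero_eq_alt (pLst : List Int) (plnd : Int) (h : -(pLst.length : Int) ≤ plnd) :
    fZero plnd pLst = fZero_alt plnd pLst := by
  by_cases hge : (pLst.length : Int) ≤ plnd
  · rw [fZero, if_pos hge]
    unfold fZero_alt
    rw [PySem.List.pyRange_one_eq_nil hge]
    rfl
  · push_neg at hge
    obtain ⟨v, hv⟩ : ∃ v, PySem.List.pyGet? pLst plnd = some v := by
      cases hg : PySem.List.pyGet? pLst plnd with
      | some v => exact ⟨v, rfl⟩
      | none =>
        rw [PySem.List.pyGet?_eq_none_iff] at hg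
        exact absurd (by unfold PySem.Raise.InRange; omega) hg
    have hcons := PySem.List.pyRange_one_cons (a := plnd) (b := (pLst.length : Int)) hge
    unfold fZero_alt
    rw [hcons]
    rw [fZero, if_neg (by omega), hv]
    simp only [fZeroLoop, hv, Option.getD_some]
    by_cases hz : v = 0
    · simp [hz]
    · rw [if_neg hz, if_neg hz]
      exact fZero_eq_alt pLst (plnd + 1) (by omega)
termination_by ((pLst.length : Int) - plnd).toNat
decreasing_by omega

-- ===== VERDICT (by name: the statement is the Claim_ definition above) =====
theorem fZero_spec : Claim_equal_fZero := by
  intro plnd pLst _ hpre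
  exact fZero_eq_alt pLst plnd hpre
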